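-- pv_equiv track=rewrite | github.com/codewith-lab/FinGOAT | langchain-v1/trading_service.py | extract_summary_table
-- ===== SOURCE A (Python) =====
-- from typing import Dict, List, Optional, Any, Tuple, Set
--
-- def extract_summary_table(text: str) -> Optional[str]:
--     """Extract the first markdown table block from text"""
--     lines = [ln.rstrip() for ln in text.splitlines()]
--     tables = []
--     current: List[str] = []
--     for line in lines:
--         if line.strip().startswith("|") and "|" in line.strip()[1:]:
--             current.append(line)
--         else:
--             if len(current) >= 2:
--                 tables.append("\n".join(current))
--             current = []
--     if len(current) >= 2:
--         tables.append("\n".join(current))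
--     return tables[0] if tables else None
-- ===== SOURCE B (Python) =====
-- def extract_summary_table(text):
--     """Extract the first markdown table block from text"""
--     lines = [ln.rstrip() for ln in text.splitlines()]
--
--     def is_table(ln):
--         s = ln.strip()
--         return s.startswith("|") and "|" in s[1:]
--
--     mask = [is_table(ln) for ln in lines]
--     # A qualifying table block (>= 2 table lines) exists iff two adjacent lines are
--     # both table lines; the FIRST such adjacent pair necessarily starts the first
--     # qualifying maximal run (any earlier run has length 1).  So: find the first
--     # adjacent pair, then extend it forward to the end of the run.
--     for i in range(len(lines) - 1):
--         if mask[i] and mask[i + 1]: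
--             j = i + 2
--             while j < len(mask) and mask[j]:
--                 j += 1
--             return "\n".join(lines[i:j])
--     return None
-- ===== Notes on version B (the rewrite author's own statement) =====
-- stated objective: alternative
-- what changed: Instead of A's accumulate-and-flush run state machine collecting all table blocks, B searches for the first ADJACENT PAIR of table lines (provably the start of the first qualifying run, since any earlier run has length 1) and then extends that pair forward to the end of the run, returning immediately.
import Mathlib
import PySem

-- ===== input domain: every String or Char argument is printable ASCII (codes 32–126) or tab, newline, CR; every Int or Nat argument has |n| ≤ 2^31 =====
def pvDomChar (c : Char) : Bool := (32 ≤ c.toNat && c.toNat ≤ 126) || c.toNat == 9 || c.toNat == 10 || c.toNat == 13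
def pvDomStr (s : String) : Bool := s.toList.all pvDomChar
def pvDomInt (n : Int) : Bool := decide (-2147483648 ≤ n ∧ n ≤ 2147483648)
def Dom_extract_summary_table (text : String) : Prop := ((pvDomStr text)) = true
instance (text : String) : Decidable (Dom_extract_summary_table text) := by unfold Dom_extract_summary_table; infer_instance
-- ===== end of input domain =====

-- B replaces A's accumulate-and-flush run state machine by a search for the first
-- ADJACENT PAIR of table lines (which provably starts the first qualifying run),
-- extended forward to the end of its run (alternative decomposition, same cost).

-- ===== PORT A =====
-- shared transliteration of the table-line test: line.strip().startswith("|") and "|" in line.strip()[1:]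
def pvIsTableLine (line : String) : Bool :=
  let s := PySem.Str.strip line
  PySem.Str.startswith s "|" && PySem.Str.isIn "|" (PySem.Str.slice s (some 1) none)

-- A's loop body on the state (tables, current)
def pvStepA (acc : List String × List String) (line : String) : List String × List String :=
  if pvIsTableLine line then (acc.1, acc.2 ++ [line])
  else if 2 ≤ acc.2.length then (acc.1 ++ [PySem.Str.join "\n" acc.2], ([] : List String))
  else (acc.1, ([] : List String))

def extract_summary_table (text : String) : Option String :=
  let lines := (PySem.Str.splitlines text).map PySem.Str.rstrip
  let st := lines.foldl pvStepA ([], [])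
  let tables := if 2 ≤ st.2.length then st.1 ++ [PySem.Str.join "\n" st.2] else st.1
  tables.head?

-- ===== PORT B =====
-- B's index loop over adjacent pairs, as structural recursion: mask[i] && mask[i+1] is the
-- test on the two list heads; the inner while-loop extending j is rest.takeWhile, and the
-- slice lines[i:j] is the two heads followed by that extension.
def pvScanB : List String → Option String
  | [] => none
  | [_] => none
  | l1 :: l2 :: rest =>
    if pvIsTableLine l1 && pvIsTableLine l2 then
      some (PySem.Str.join "\n" (l1 :: l2 :: rest.takeWhile pvIsTableLine))
    else pvScanB (l2 :: rest)

def extract_summary_table_alt (text : String) : Option String :=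
  pvScanB ((PySem.Str.splitlines text).map PySem.Str.rstrip)

-- ===== PRECONDITION & SPEC =====
def Spec_extract_summary_table (text : String) (out : Option String) : Prop := out = extract_summary_table_alt text
instance (text : String) (out : Option String) : Decidable (Spec_extract_summary_table text out) := by unfold Spec_extract_summary_table; infer_instance

-- ===== CLAIM (what is proved, stated in full; the proofs are below) =====
def Claim_equal_extract_summary_table : Prop := ∀ (text : String), Dom_extract_summary_table text → Spec_extract_summary_table text (extract_summary_table text)

-- ===== LEMMAS AND PROOFS =====

-- proof-side characterisation of A's fold: the scan with the pending run made explicit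
def pvRunAux (current : List String) : List String → Option String
  | [] => if 2 ≤ current.length then some (PySem.Str.join "\n" current) else none
  | l :: ls =>
    if pvIsTableLine l then pvRunAux (current ++ [l]) ls
    else if 2 ≤ current.length then some (PySem.Str.join "\n" current)
    else pvRunAux [] ls

-- proof-side intermediate: first maximal run of table lines with length ≥ 2
def pvFirstRun : List String → Option String
  | [] => none
  | l :: ls =>
    if pvIsTableLine l then
      let run := l :: ls.takeWhile pvIsTableLine
      if 2 ≤ run.length then some (PySem.Str.join "\n" run)
      else pvFirstRun (ls.dropWhile pvIsTableLine)
    else pvFirstRun ls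
termination_by ls => ls.length
decreasing_by
  · exact Nat.lt_succ_of_le (ls.length_dropWhile_le pvIsTableLine)
  · simp

theorem pvFoldA_prefix (lines : List String) : ∀ (tables current : List String),
    lines.foldl pvStepA (tables, current)
      = (tables ++ (lines.foldl pvStepA ([], current)).1, (lines.foldl pvStepA ([], current)).2) := by
  induction lines with
  | nil => intro t c; simp
  | cons l ls ih =>
    intro t c
    simp only [List.foldl_cons, pvStepA]
    split
    · exact ih t (c ++ [l])
    · split
      · simp only [List.nil_append]
        rw [ih [PySem.Str.join "\n" c] [], ih (t ++ [PySem.Str.join "\n" c]) []]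
        simp
      · exact ih t []

theorem pvFoldA_eq_runAux (lines : List String) : ∀ (current : List String),
    (if 2 ≤ (lines.foldl pvStepA ([], current)).2.length
      then (lines.foldl pvStepA ([], current)).1 ++ [PySem.Str.join "\n" (lines.foldl pvStepA ([], current)).2]
      else (lines.foldl pvStepA ([], current)).1).head?
      = pvRunAux current lines := by
  induction lines with
  | nil =>
    intro c
    simp only [List.foldl_nil, pvRunAux]
    split <;> simp
  | cons l ls ih =>
    intro c
    simp only [List.foldl_cons, pvStepA, pvRunAux]
    split
    · exact ih (c ++ [l])
    · split
      · rw [pvFoldA_prefix]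
        split <;> simp
      · exact ih []

theorem pvRunAux_eq_firstRun (lines : List String) :
    (∀ current, pvRunAux current lines
        = if 2 ≤ (current ++ lines.takeWhile pvIsTableLine).length
          then some (PySem.Str.join "\n" (current ++ lines.takeWhile pvIsTableLine))
          else pvFirstRun (lines.dropWhile pvIsTableLine))
    ∧ pvRunAux [] lines = pvFirstRun lines := by
  induction lines with
  | nil => exact ⟨fun c => by simp [pvRunAux, pvFirstRun], by simp [pvRunAux, pvFirstRun]⟩
  | cons l ls ih =>
    refine ⟨fun c => ?_, ?_⟩
    · simp only [pvRunAux]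
      by_cases h : pvIsTableLine l = true
      · rw [if_pos h, ih.1 (c ++ [l]), List.takeWhile_cons_of_pos h, List.dropWhile_cons_of_pos h]
        simp
      · rw [if_neg h, List.takeWhile_cons_of_neg h, List.dropWhile_cons_of_neg h]
        simp only [List.append_nil]
        split
        · rfl
        · rw [ih.2]
          simp [pvFirstRun, h]
    · simp only [pvRunAux]
      by_cases h : pvIsTableLine l = true
      · simp only [List.nil_append] at *
        rw [if_pos h, ih.1 [l]]
        conv_rhs => rw [pvFirstRun]
        simp [h]
      · rw [if_neg h, ih.2]
        simp [pvFirstRun, h]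

-- the first run of length ≥ 2 starts exactly at the first adjacent pair of table lines
theorem pvFirstRun_eq_scanB (lines : List String) : pvFirstRun lines = pvScanB lines := by
  induction lines with
  | nil => simp [pvFirstRun, pvScanB]
  | cons l ls ih =>
    rw [pvFirstRun]
    by_cases h : pvIsTableLine l = true
    · cases ls with
      | nil => simp [pvScanB, h, pvFirstRun]
      | cons l2 rest =>
        by_cases h2 : pvIsTableLine l2 = true
        · rw [List.takeWhile_cons_of_pos h2]
          simp [pvScanB, h, h2]
        · rw [List.takeWhile_cons_of_neg h2, List.dropWhile_cons_of_neg h2]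
          simp only [h, if_true]
          rw [if_neg (by simp), ih]
          simp [pvScanB, h2]
    · rw [if_neg h, ih]
      cases ls with
      | nil => simp [pvScanB]
      | cons l2 rest => simp [pvScanB, h]

-- ===== VERDICT (by name: the statement is the Claim_ definition above) =====
theorem extract_summary_table_spec : Claim_equal_extract_summary_table := by
  intro text _
  unfold Spec_extract_summary_table extract_summary_table extract_summary_table_alt
  rw [pvFoldA_eq_runAux, (pvRunAux_eq_firstRun _).2, pvFirstRun_eq_scanB]
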